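-- pv_equiv track=rewrite | github.com/BrianDYKim/practice_coding_test_python | programmers/lv2/programmers_60057.py | get_encoded_length
-- ===== SOURCE A (Python) =====
-- def get_encoded_length(sentence, length):
--     current_index, last_index = 0, len(sentence) - 1
--     encoded_list = [['', 0]]  # 압축 정보를 담는 배열
--     encoded_str = ''  # 압축된 결과
--
--     # 압축 시작
--     while current_index <= last_index:
--         # 만약 current_index로부터 length만큼 자를수가 없다면?
--         if current_index + length >= len(sentence):
--             token = sentence[current_index:]
--         # length만큼 자를 수 있다면?
--         else:
--             token = sentence[current_index: current_index + length]
--         current_index += length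
--
--         # 만약 token이 이전의 내용물과 일치한다면
--         if token == encoded_list[-1][0]:
--             encoded_list[-1][1] += 1
--         # 만약 불일치한다면
--         else:
--             encoded_list.append([token, 1])
--
--     # 더미 데이터 삭제
--     encoded_list.pop(0)
--
--     # 압축된 결과물을 할당한다
--     for token, num in encoded_list:
--         if num == 1:
--             encoded_str += token
--         else:
--             encoded_str += (str(num) + token)
--
--     return len(encoded_str)
-- ===== SOURCE B (Python) =====
-- def get_encoded_length(sentence, length):
--     # build the fixed-size token list first, then group consecutive equal
--     # tokens and accumulate the encoded length directly (no encoded string,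
--     # no [['', 0]] sentinel).
--     tokens = [sentence[i:i + length] for i in range(0, len(sentence), length)]
--     total = 0
--     rest = tokens
--     while rest:
--         head = rest[0]
--         n = 1
--         rest = rest[1:]
--         while rest and rest[0] == head:
--             n += 1
--             rest = rest[1:]
--         total += len(head) if n == 1 else len(str(n)) + len(head)
--     return total
-- ===== Notes on version B (the rewrite author's own statement) =====
-- stated objective: simpler
-- what changed: B builds the block-token list with one range comprehension, then run-length groups consecutive equal tokens and sums the encoded length arithmetically, never constructing the encoded string, the mutable pair list or the [['',0]] sentinel that A threads through its single while loop.
-- outside the precondition, e.g. on get_encoded_length('', 0): A returns 0, B raises ValueError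
import Mathlib
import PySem

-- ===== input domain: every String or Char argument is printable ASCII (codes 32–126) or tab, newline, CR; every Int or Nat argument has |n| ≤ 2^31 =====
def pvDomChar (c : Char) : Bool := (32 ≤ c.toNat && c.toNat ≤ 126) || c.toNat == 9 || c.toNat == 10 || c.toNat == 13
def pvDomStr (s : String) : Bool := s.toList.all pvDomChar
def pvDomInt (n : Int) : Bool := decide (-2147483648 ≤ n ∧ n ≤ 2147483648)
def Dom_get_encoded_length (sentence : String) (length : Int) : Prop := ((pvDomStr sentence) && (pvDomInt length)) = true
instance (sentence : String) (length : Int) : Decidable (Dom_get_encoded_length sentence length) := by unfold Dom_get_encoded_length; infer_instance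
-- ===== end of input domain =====

-- B replaces A's sentinel-seeded pair list and string building by tokenize → run-length group → summed lengths (same cost, simpler decomposition); equivalence of the RETURN value is proved on Pre_.

-- ===== PORT A =====
-- token = sentence[current_index:] / sentence[current_index:current_index+length]
def gelToken (cs : List Char) (length ci : Int) : List Char :=
  if (cs.length : Int) ≤ ci + length then PySem.List.slice cs (some ci) none
  else PySem.List.slice cs (some ci) (some (ci + length))

-- one iteration's update of encoded_list (compare with encoded_list[-1][0], bump or append)
def gelStep (el : List (List Char × Int)) (token : List Char) : List (List Char × Int) :=
  match el.getLast? with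
  | some (t, c) => if token = t then el.dropLast ++ [(t, c + 1)] else el ++ [(token, 1)]
  | none => el ++ [(token, 1)]

-- the while loop; '0 < length' is a totality guard only: Python diverges there (outside Pre_)
def gelLoop (cs : List Char) (length ci : Int) (el : List (List Char × Int)) : List (List Char × Int) :=
  if _h : 0 < length ∧ ci ≤ (cs.length : Int) - 1 then
    gelLoop cs length (ci + length) (gelStep el (gelToken cs length ci))
  else el
termination_by (((cs.length : Int)) - ci).toNat
decreasing_by omega

def get_encoded_length (sentence : String) (length : Int) : Int :=
  -- encoded_list.pop(0) = .tail; the foldl builds encoded_str; return len(encoded_str)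
  ((((gelLoop sentence.toList length 0 [([], 0)]).tail).foldl
      (fun acc p => if p.2 = 1 then acc ++ p.1 else acc ++ (PySem.Int.toChars p.2 ++ p.1))
      ([] : List Char)).length : Int)

-- ===== PORT B =====
-- inner while: count further copies of head at the front, return (extra copies, rest)
def gelAltCount (head : List Char) : List (List Char) → Int × List (List Char)
  | [] => (0, [])
  | t :: ts => if t = head then ((gelAltCount head ts).1 + 1, (gelAltCount head ts).2) else (0, t :: ts)

theorem gelAltCount_len (head : List Char) (l : List (List Char)) :
    (gelAltCount head l).2.length ≤ l.length := by
  induction l with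
  | nil => simp [gelAltCount]
  | cons t ts ih => by_cases h : t = head <;> simp [gelAltCount, h] <;> omega

-- outer while over (total, rest)
def gelAltSum (total : Int) (l : List (List Char)) : Int :=
  match l with
  | [] => total
  | t :: ts =>
    let k := gelAltCount t ts
    let n : Int := 1 + k.1
    gelAltSum (total + (if n = 1 then (t.length : Int) else ((PySem.Int.toChars n).length : Int) + (t.length : Int))) k.2
termination_by l.length
decreasing_by have := gelAltCount_len t ts; simp; omega

def get_encoded_length_alt (sentence : String) (length : Int) : Int :=
  gelAltSum 0 ((PySem.List.pyRange 0 (sentence.toList.length : Int) length).map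
    (fun i => PySem.List.slice sentence.toList (some i) (some (i + length))))

-- ===== PRECONDITION & SPEC =====
-- Pre_ excludes non-positive length with a nonempty sentence (A's while loop never terminates
-- there) and the single input class sentence = '' with length = 0 (A returns 0 but B's
-- range(0, 0, 0) raises ValueError); sentence = '' with negative length stays inside.
def Pre_get_encoded_length (sentence : String) (length : Int) : Prop :=
  1 ≤ length ∨ (sentence = "" ∧ length < 0)
instance (sentence : String) (length : Int) : Decidable (Pre_get_encoded_length sentence length) := by
  unfold Pre_get_encoded_length; infer_instance

def pvWitness_get_encoded_length : String × Int := ("aabbaccc", 2)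

def Spec_get_encoded_length (sentence : String) (length : Int) (out : Int) : Prop := out = get_encoded_length_alt sentence length
instance (sentence : String) (length : Int) (out : Int) : Decidable (Spec_get_encoded_length sentence length out) := by unfold Spec_get_encoded_length; infer_instance

-- ===== CLAIM (what is proved, stated in full; the proofs are below) =====
def Claim_equal_get_encoded_length : Prop := ∀ (sentence : String) (length : Int), Dom_get_encoded_length sentence length → Pre_get_encoded_length sentence length → Spec_get_encoded_length sentence length (get_encoded_length sentence length)

-- ===== LEMMAS AND PROOFS =====

-- run-length decomposition of a token list (proof-side specification)
def rleSpec : List (List Char) → List (List Char × Int)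
  | [] => []
  | t :: ts => (t, 1 + (gelAltCount t ts).1) :: rleSpec (gelAltCount t ts).2
termination_by l => l.length
decreasing_by have := gelAltCount_len t ts; simp; omega

-- contribution of one run to the encoded length
def gelContrib (p : List Char × Int) : Int :=
  if p.2 = 1 then (p.1.length : Int) else ((PySem.Int.toChars p.2).length : Int) + (p.1.length : Int)

def gelContribSum (l : List (List Char × Int)) : Int := (l.map gelContrib).sum

theorem pyRange_pos_nil (a b s : Int) (hs : 0 < s) (hba : b ≤ a) :
    PySem.List.pyRange a b s = [] := by
  rw [PySem.List.pyRange_of_pos a b hs, if_neg (by omega)]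
  simp

theorem pyRange_pos_cons (a b s : Int) (hs : 0 < s) (hab : a < b) :
    PySem.List.pyRange a b s = a :: PySem.List.pyRange (a + s) b s := by
  rw [PySem.List.pyRange_of_pos a b hs, PySem.List.pyRange_of_pos (a + s) b hs,
    if_pos hab]
  by_cases h : a + s < b
  · rw [if_pos h]
    have hq : (b - a + s - 1) / s = (b - (a + s) + s - 1) / s + 1 := by
      have : b - a + s - 1 = (b - (a + s) + s - 1) + 1 * s := by ring
      rw [this, Int.add_mul_ediv_right _ _ (by omega : s ≠ 0)]
    have hpos : 0 ≤ (b - (a + s) + s - 1) / s := by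
      apply Int.ediv_nonneg <;> omega
    have : ((b - a + s - 1) / s).toNat = ((b - (a + s) + s - 1) / s).toNat + 1 := by omega
    rw [this, List.range_succ_eq_map]
    simp only [List.map_cons, List.map_map]
    refine List.cons_eq_cons.mpr ⟨by simp, ?_⟩
    apply List.map_congr_left
    intro k _
    simp [Function.comp]
    ring
  · rw [if_neg h]
    have h1 : (1 : Int) ≤ (b - a + s - 1) / s := by
      rw [Int.le_ediv_iff_mul_le hs]; omega
    have h2 : (b - a + s - 1) / s < 2 := by
      rw [Int.ediv_lt_iff_lt_mul hs]; omega
    have : ((b - a + s - 1) / s).toNat = 1 := by omega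
    rw [this]
    simp

theorem gelToken_eq (cs : List Char) (length ci : Int) (hci : 0 ≤ ci) (hl : 1 ≤ length) :
    gelToken cs length ci = PySem.List.slice cs (some ci) (some (ci + length)) := by
  unfold gelToken
  split
  · rename_i h
    rw [PySem.List.slice_from cs hci, PySem.List.slice_toNat cs hci (by omega)]
    rw [List.take_of_length_le]
    simp; omega
  · rfl

theorem gelLoop_eq_foldl (cs : List Char) (length : Int) (hl : 1 ≤ length) :
    ∀ ci el, 0 ≤ ci →
      gelLoop cs length ci el =
      ((PySem.List.pyRange ci (cs.length : Int) length).map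
        (fun i => PySem.List.slice cs (some i) (some (i + length)))).foldl gelStep el := by
  intro ci el hci
  fun_induction gelLoop cs length ci el with
  | case1 ci el h ih =>
    rw [pyRange_pos_cons ci (cs.length : Int) length (by omega) (by omega)]
    rw [List.map_cons, List.foldl_cons, ← gelToken_eq cs length ci hci hl]
    exact ih (by omega)
  | case2 ci el h =>
    rcases not_and_or.mp h with h' | h'
    · omega
    · rw [pyRange_pos_nil ci (cs.length : Int) length (by omega) (by omega)]
      simp

theorem foldl_gelStep_run (ts : List (List Char)) :
    ∀ (acc : List (List Char × Int)) (t : List Char) (c : Int),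
      List.foldl gelStep (acc ++ [(t, c)]) ts =
      acc ++ (t, c + (gelAltCount t ts).1) :: rleSpec (gelAltCount t ts).2 := by
  induction ts with
  | nil => intro acc t c; simp [gelAltCount, rleSpec]
  | cons u ts ih =>
    intro acc t c
    by_cases h : u = t
    · have hstep : gelStep (acc ++ [(t, c)]) u = acc ++ [(t, c + 1)] := by
        simp [gelStep, h]
      rw [List.foldl_cons, hstep, ih acc t (c + 1)]
      simp only [gelAltCount, if_pos h]
      have harith : c + 1 + (gelAltCount t ts).1 = c + ((gelAltCount t ts).1 + 1) := by ring
      rw [harith]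
    · have hstep : gelStep (acc ++ [(t, c)]) u = (acc ++ [(t, c)]) ++ [(u, 1)] := by
        simp [gelStep, h]
      rw [List.foldl_cons, hstep, ih (acc ++ [(t, c)]) u 1]
      simp only [gelAltCount, if_neg h]
      rw [show rleSpec (u :: ts) = (u, 1 + (gelAltCount u ts).1) :: rleSpec (gelAltCount u ts).2 from by rw [rleSpec]]
      simp

theorem tail_foldl_gelStep (ts : List (List Char)) (hne : ∀ t ∈ ts, t ≠ ([] : List Char)) :
    (List.foldl gelStep [(([] : List Char), (0 : Int))] ts).tail = rleSpec ts := by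
  cases ts with
  | nil => simp [rleSpec]
  | cons t ts =>
    have ht : t ≠ ([] : List Char) := hne t (by simp)
    have hstep : gelStep [(([] : List Char), (0 : Int))] t = [(([] : List Char), (0 : Int))] ++ [(t, 1)] := by
      simp [gelStep, ht]
    rw [List.foldl_cons, hstep, foldl_gelStep_run ts [(([] : List Char), (0 : Int))] t 1]
    rw [show rleSpec (t :: ts) = (t, 1 + (gelAltCount t ts).1) :: rleSpec (gelAltCount t ts).2 from by rw [rleSpec]]
    simp

theorem length_foldl_encode (l : List (List Char × Int)) :
    ∀ (acc : List Char),
      (((l.foldl (fun acc p => if p.2 = 1 then acc ++ p.1 else acc ++ (PySem.Int.toChars p.2 ++ p.1)) acc).length : Int)) =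
      (acc.length : Int) + gelContribSum l := by
  induction l with
  | nil => intro acc; simp [gelContribSum]
  | cons p l ih =>
    intro acc
    rw [List.foldl_cons, ih]
    unfold gelContribSum gelContrib
    by_cases h : p.2 = 1 <;> simp [h] <;> ring

theorem gelAltSum_eq (total : Int) (ts : List (List Char)) :
    gelAltSum total ts = total + gelContribSum (rleSpec ts) := by
  fun_induction gelAltSum total ts with
  | case1 total => simp [rleSpec, gelContribSum]
  | case2 total t ts k n ih =>
    simp only [dite_eq_ite] at ih
    rw [ih]
    rw [show rleSpec (t :: ts) = (t, 1 + (gelAltCount t ts).1) :: rleSpec (gelAltCount t ts).2 from by rw [rleSpec]]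
    unfold gelContribSum gelContrib
    simp only [List.map_cons, List.sum_cons, k, n]
    ring

theorem tokens_nonempty (cs : List Char) (length : Int) (hl : 1 ≤ length) :
    ∀ t ∈ (PySem.List.pyRange 0 (cs.length : Int) length).map
      (fun i => PySem.List.slice cs (some i) (some (i + length))), t ≠ ([] : List Char) := by
  intro t ht
  rcases List.mem_map.mp ht with ⟨i, hi, rfl⟩
  rw [PySem.List.mem_pyRange_iff_of_pos (by omega)] at hi
  obtain ⟨h0, hlt, -⟩ := hi
  rw [PySem.List.slice_toNat cs h0 (by omega)]
  intro hnil
  have := congrArg List.length hnil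
  simp at this
  omega

-- ===== VERDICT (by name: the statement is the Claim_ definition above) =====
theorem get_encoded_length_spec : Claim_equal_get_encoded_length := by
  intro sentence length _ hpre
  unfold Spec_get_encoded_length get_encoded_length get_encoded_length_alt
  rcases hpre with hl | ⟨hs, hneg⟩
  · rw [gelLoop_eq_foldl sentence.toList length hl 0 [(([] : List Char), (0 : Int))] le_rfl]
    rw [tail_foldl_gelStep _ (tokens_nonempty sentence.toList length hl)]
    rw [length_foldl_encode _ ([] : List Char), gelAltSum_eq]
    simp
  · subst hs
    have h0 : "".toList = ([] : List Char) := rfl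
    rw [h0]
    rw [gelLoop, dif_neg (by simp)]
    rw [show PySem.List.pyRange 0 ((([] : List Char).length : Nat) : Int) length = [] from by
      simp [PySem.List.pyRange]]
    simp [gelAltSum]
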